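-- pv_equiv track=rewrite | github.com/joojeehwan/algorithm_genius | Programmers/132265_롤케이크자르기/haeun_롤케이크자르기.py | solution
-- ===== SOURCE A (Python) =====
-- def solution(topping):
--     answer = 0
--     cnt = len(topping)
--     cheolsu = dict()
--     brother = dict()
--
--     for i in range(cnt):
--         top = topping[i]
--         brother[top] = brother.get(top, 0) + 1
--
--     for cut in range(cnt-1):
--         now_topping = topping[cut]
--         cheolsu[now_topping] = cheolsu.get(now_topping, 0) + 1
--         brother[now_topping] -= 1
--         if brother[now_topping] == 0:
--             del brother[now_topping]
--         if len(cheolsu) == len(brother):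
--             answer += 1
--
--     return answer
-- ===== SOURCE B (Python) =====
-- def solution(topping):
--     # Precompute suffix-distinct counts right[i] = number of distinct values in topping[i:],
--     # then one forward pass with a growing left set.
--     right = []
--     seen = set()
--     for t in reversed(topping):
--         seen.add(t)
--         right.append(len(seen))
--     right.reverse()
--     answer = 0
--     left = set()
--     for cut in range(len(topping) - 1):
--         left.add(topping[cut])
--         if len(left) == right[cut + 1]:
--             answer += 1
--     return answer
-- ===== Notes on version B (the rewrite author's own statement) =====
-- stated objective: alternative
-- what changed: Replaces A's lockstep dual-dict grow/shrink (with in-loop decrement and deletion) by a precomputed suffix-distinct table built in a right-to-left pass over sets, followed by an independent forward pass that compares the growing left set's size with the table entry.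
import Mathlib
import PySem

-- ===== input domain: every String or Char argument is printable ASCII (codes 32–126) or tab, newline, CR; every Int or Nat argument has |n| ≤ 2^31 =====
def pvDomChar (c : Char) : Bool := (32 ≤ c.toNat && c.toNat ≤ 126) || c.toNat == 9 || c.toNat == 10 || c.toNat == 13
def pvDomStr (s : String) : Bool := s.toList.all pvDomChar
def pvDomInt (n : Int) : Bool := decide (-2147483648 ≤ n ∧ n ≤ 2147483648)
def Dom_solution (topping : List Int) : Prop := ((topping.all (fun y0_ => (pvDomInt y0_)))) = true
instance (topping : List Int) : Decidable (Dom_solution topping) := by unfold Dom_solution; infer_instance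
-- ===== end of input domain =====

-- B replaces A's lockstep dual-dict grow/shrink by a precomputed suffix-distinct table plus a
-- separate forward pass with a growing left set (alternative decomposition, same asymptotic cost).

-- ===== PORT A =====
-- loop body of A's second loop; state = (cheolsu, brother, answer)
def solutionStep (topping : List Int)
    (st : PySem.Dict Int Int × PySem.Dict Int Int × Int) (cut : Int) :
    PySem.Dict Int Int × PySem.Dict Int Int × Int :=
  let now := PySem.List.pyGetD topping cut 0  -- cut is always a valid index here
  let cheolsu := st.1.insert now (st.1.getD now 0 + 1)
  let brother := st.2.1.insert now (st.2.1.getD now 0 - 1)  -- brother[now] -= 1 (key always present)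
  let brother := if brother.getD now 0 = 0 then brother.erase now else brother
  let answer := if cheolsu.size = brother.size then st.2.2 + 1 else st.2.2
  (cheolsu, brother, answer)

def solution (topping : List Int) : Int :=
  let cnt : Int := topping.length
  let brother :=
    (PySem.List.pyRange 0 cnt 1).foldl
      (fun (b : PySem.Dict Int Int) i =>
        let top := PySem.List.pyGetD topping i 0  -- i is always a valid index
        b.insert top (b.getD top 0 + 1))
      PySem.Dict.empty
  ((PySem.List.pyRange 0 (cnt - 1) 1).foldl (solutionStep topping)
      (PySem.Dict.empty, brother, 0)).2.2

-- ===== PORT B =====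
-- right-to-left pass: right[i] = number of distinct toppings in topping[i:]
def solutionAltRight (topping : List Int) : List Int :=
  ((topping.reverse.foldl
      (fun (st : PySem.Set Int × List Int) t =>
        let seen := PySem.Set.add st.1 t
        (seen, st.2 ++ [PySem.Set.len seen]))
      (PySem.Set.empty, [])).2).reverse

-- loop body of B's forward pass; state = (left, answer)
def solutionAltStep (topping right : List Int) (st : PySem.Set Int × Int) (cut : Int) :
    PySem.Set Int × Int :=
  let left := PySem.Set.add st.1 (PySem.List.pyGetD topping cut 0)  -- cut is always a valid index
  (left, if PySem.Set.len left = PySem.List.pyGetD right (cut + 1) 0 then st.2 + 1 else st.2)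

def solution_alt (topping : List Int) : Int :=
  let right := solutionAltRight topping
  ((PySem.List.pyRange 0 ((topping.length : Int) - 1) 1).foldl
      (solutionAltStep topping right) (PySem.Set.empty, 0)).2

-- ===== PRECONDITION & SPEC =====
def Spec_solution (topping : List Int) (out : Int) : Prop := out = solution_alt topping
instance (topping : List Int) (out : Int) : Decidable (Spec_solution topping out) := by unfold Spec_solution; infer_instance

-- ===== CLAIM (what is proved, stated in full; the proofs are below) =====
def Claim_equal_solution : Prop := ∀ (topping : List Int), Dom_solution topping → Spec_solution topping (solution topping)

-- ===== LEMMAS AND PROOFS =====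

-- number of distinct values of a list
def dcount (l : List Int) : ℕ := (PySem.Set.ofList l).length

-- number of good cuts among the first k cut positions
def goodCnt (tp : List Int) (k : ℕ) : ℕ :=
  ((List.range k).filter
    (fun j => dcount (tp.take (j+1)) == dcount (tp.drop (j+1)))).length

theorem goodCnt_succ (tp : List Int) (k : ℕ) :
    goodCnt tp (k+1) = goodCnt tp k +
      (if dcount (tp.take (k+1)) = dcount (tp.drop (k+1)) then 1 else 0) := by
  simp only [goodCnt, List.range_succ, List.filter_append, List.length_append,
    List.filter_cons, List.filter_nil]
  split_ifs with h <;> simp_all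

theorem nodup_mem_length {xs ys : List Int} (hx : xs.Nodup) (hy : ys.Nodup)
    (h : ∀ x, x ∈ xs ↔ x ∈ ys) : xs.length = ys.length := by
  have hfin : xs.toFinset = ys.toFinset := by
    ext a; simp [List.mem_toFinset, h a]
  calc xs.length = xs.toFinset.card := (List.toFinset_card_of_nodup hx).symm
    _ = ys.toFinset.card := by rw [hfin]
    _ = ys.length := List.toFinset_card_of_nodup hy

theorem dcount_eq_of_mem_iff {l l' : List Int} (h : ∀ x, x ∈ l ↔ x ∈ l') :
    dcount l = dcount l' := by
  apply nodup_mem_length (PySem.Set.nodup_ofList l) (PySem.Set.nodup_ofList l')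
  intro x; simp [PySem.Set.mem_ofList, h x]

-- Dict.erase facts (erase = filter on items)
theorem keys_erase {ν : Type} (d : PySem.Dict Int ν) (k : Int) :
    (d.erase k).keys = d.keys.filter (fun x => !(x == k)) := by
  obtain ⟨items⟩ := d
  induction items with
  | nil => rfl
  | cons p rest ih =>
      simp only [PySem.Dict.erase, PySem.Dict.keys] at *
      by_cases h : p.1 == k <;> simp [h] <;> simpa using ih

theorem get?_erase {ν : Type} (d : PySem.Dict Int ν) (k k' : Int) :
    (d.erase k).get? k' = if k' = k then none else d.get? k' := by
  obtain ⟨items⟩ := d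
  induction items with
  | nil => simp [PySem.Dict.erase, PySem.Dict.get?]
  | cons p rest ih =>
      simp only [PySem.Dict.erase, List.filter_cons] at *
      by_cases hp : p.1 = k
      · have hb : (!(p.1 == k)) = false := by simp [hp]
        rw [hb]
        simp only [if_neg (by simp : ¬ false = true)] at *
        rw [ih, PySem.Dict.get?_mk_cons]
        by_cases h2 : k' = k
        · simp [h2]
        · have : (p.1 == k') = false := by simp [hp]; omega
          simp [this, h2]
      · have hb : (!(p.1 == k)) = true := by simp [hp]
        rw [hb, if_pos rfl]
        rw [PySem.Dict.get?_mk_cons, PySem.Dict.get?_mk_cons]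
        by_cases h3 : p.1 = k'
        · have h2 : ¬ k' = k := fun h => hp (h3.trans h)
          simp [h3, h2]
        · have : (p.1 == k') = false := by simp [h3]
          rw [this]
          simp only [Bool.false_eq_true, if_neg (by simp : ¬ False)] at *
          rw [ih]

theorem getD_erase_self {ν : Type} (d : PySem.Dict Int ν) (k : Int) (d0 : ν) :
    (d.erase k).getD k d0 = d0 := by
  rw [PySem.Dict.getD_eq_get?_getD, get?_erase, if_pos rfl]; rfl

theorem getD_erase_of_ne {ν : Type} (d : PySem.Dict Int ν) (k k' : Int) (d0 : ν)
    (h : k' ≠ k) : (d.erase k).getD k' d0 = d.getD k' d0 := by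
  rw [PySem.Dict.getD_eq_get?_getD, get?_erase, if_neg h, ← PySem.Dict.getD_eq_get?_getD]

-- a dict whose keys (nodup) have the same membership as l has size dcount l
theorem size_eq_dcount {ν : Type} (d : PySem.Dict Int ν) (l : List Int)
    (hnd : d.keys.Nodup) (h : ∀ x, x ∈ d.keys ↔ x ∈ l) : d.size = dcount l := by
  have hl : d.keys.length = dcount l := by
    apply nodup_mem_length hnd (PySem.Set.nodup_ofList l)
    intro x; simp only [PySem.Set.mem_ofList, h x]
  simpa [PySem.Dict.keys] using hl

-- index into a list: pyGetD at a Nat cast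
theorem pyGetD_nat (tp : List Int) (k : ℕ) (hk : k < tp.length) :
    PySem.List.pyGetD tp (k : Int) 0 = tp[k] := by
  rw [PySem.List.pyGetD_eq_getElem tp 0 (by positivity) (by exact_mod_cast hk)]
  simp

-- take (k+1) = take k ++ [tp[k]]
theorem take_succ_getElem (tp : List Int) (k : ℕ) (hk : k < tp.length) :
    tp.take (k+1) = tp.take k ++ [tp[k]] := by
  rw [List.take_add_one]; simp [List.getElem?_eq_getElem hk]

-- invariant for A's second loop
theorem A_loop (tp : List Int) (k : ℕ) (hk : k ≤ tp.length) :
    ∃ ch br,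
      (PySem.List.pyRange 0 (k : Int) 1).foldl (solutionStep tp)
        (PySem.Dict.empty, PySem.Dict.counter tp, 0) = (ch, br, (goodCnt tp k : Int)) ∧
      ch.keys.Nodup ∧ (∀ x, x ∈ ch.keys ↔ x ∈ tp.take k) ∧
      (∀ x, ch.getD x 0 = ((tp.take k).count x : Int)) ∧
      br.keys.Nodup ∧ (∀ x, x ∈ br.keys ↔ x ∈ tp.drop k) ∧
      (∀ x, br.getD x 0 = ((tp.drop k).count x : Int)) := by
  induction k with
  | zero =>
      refine ⟨PySem.Dict.empty, PySem.Dict.counter tp, ?_, ?_, ?_, ?_, ?_, ?_, ?_⟩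
      · simp [PySem.List.pyRange_one_eq_nil, goodCnt]
      · simp [PySem.Dict.keys, PySem.Dict.empty]
      · intro x; simp [PySem.Dict.keys, PySem.Dict.empty]
      · intro x; simp [PySem.Dict.getD_empty]
      · exact PySem.Dict.nodup_keys_counter tp
      · intro x; simp [PySem.Dict.keys_counter, PySem.Set.mem_ofList]
      · intro x; simp [PySem.Dict.getD_counter]
  | succ k ih =>
      have hk' : k < tp.length := by omega
      obtain ⟨ch, br, heq, hchnd, hchmem, hchget, hbrnd, hbrmem, hbrget⟩ := ih (by omega)
      have hdropk : tp.drop k = tp[k] :: tp.drop (k+1) := List.drop_eq_getElem_cons hk'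
      have hrange : PySem.List.pyRange 0 ((k+1 : ℕ) : Int) 1
          = PySem.List.pyRange 0 (k : Int) 1 ++ [(k : Int)] := by
        push_cast
        exact PySem.List.pyRange_one_succ_right (by positivity)
      rw [hrange, List.foldl_append, heq]
      simp only [List.foldl_cons, List.foldl_nil]
      unfold solutionStep
      simp only [pyGetD_nat tp k hk']
      set now := tp[k] with hnow
      set ch' := ch.insert now (ch.getD now 0 + 1) with hch'
      set br1 := br.insert now (br.getD now 0 - 1) with hbr1
      -- properties of ch'
      have hch'nd : ch'.keys.Nodup := PySem.Dict.nodup_keys_insert _ _ _ hchnd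
      have htake : tp.take (k+1) = tp.take k ++ [now] := take_succ_getElem tp k hk'
      have hch'mem : ∀ x, x ∈ ch'.keys ↔ x ∈ tp.take (k+1) := by
        intro x
        rw [hch', PySem.Dict.mem_keys_insert, htake, List.mem_append, List.mem_singleton]
        rw [hchmem x]; tauto
      have hch'get : ∀ x, ch'.getD x 0 = ((tp.take (k+1)).count x : Int) := by
        intro x
        rw [hch', PySem.Dict.getD_insert, htake, List.count_append]
        by_cases hx : x = now
        · rw [if_pos hx, hx, hchget now]
          have h1 : List.count now [now] = 1 := by simp
          rw [h1]; push_cast; ring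
        · rw [if_neg hx, hchget x]
          have h0 : List.count x [now] = 0 := by
            rw [List.count_eq_zero]; simp [hx]
          rw [h0, Nat.add_zero]
      -- value held at now after the decrement
      have hbr1get_now : br1.getD now 0 = ((tp.drop (k+1)).count now : Int) := by
        rw [hbr1, PySem.Dict.getD_insert_self, hbrget now, hdropk]
        simp [List.count_cons_self]
      have hbr1get_ne : ∀ x, x ≠ now → br1.getD x 0 = ((tp.drop (k+1)).count x : Int) := by
        intro x hx
        rw [hbr1, PySem.Dict.getD_insert_of_ne _ _ _ hx, hbrget x, hdropk,
          List.count_cons_of_ne (Ne.symm hx)]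
      have hbr1nd : br1.keys.Nodup := PySem.Dict.nodup_keys_insert _ _ _ hbrnd
      have hbr1mem : ∀ x, x ∈ br1.keys ↔ x = now ∨ x ∈ tp.drop k := by
        intro x; rw [hbr1, PySem.Dict.mem_keys_insert, hbrmem x]
      -- the branch
      by_cases hz : br1.getD now 0 = 0
      · -- count of now in drop (k+1) is zero: erase
        rw [if_pos hz]
        have hcnt0 : (tp.drop (k+1)).count now = 0 := by
          have h := hbr1get_now; rw [hz] at h; exact_mod_cast h.symm
        have hnotmem : now ∉ tp.drop (k+1) := List.count_eq_zero.mp hcnt0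
        set br' := br1.erase now with hbr'
        have hbr'nd : br'.keys.Nodup := by
          rw [hbr', keys_erase]; exact hbr1nd.filter _
        have hbr'mem : ∀ x, x ∈ br'.keys ↔ x ∈ tp.drop (k+1) := by
          intro x
          rw [hbr', keys_erase, List.mem_filter]
          constructor
          · rintro ⟨hx, hne⟩
            have hne' : x ≠ now := by simpa using hne
            rcases (hbr1mem x).1 hx with h | h
            · exact absurd h hne'
            · rw [hdropk] at h
              rcases List.mem_cons.mp h with h | h
              · exact absurd h hne'
              · exact h
          · intro hx
            have hne : x ≠ now := fun h => hnotmem (h ▸ hx)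
            refine ⟨(hbr1mem x).2 (Or.inr ?_), by simpa using hne⟩
            rw [hdropk]; exact List.mem_cons_of_mem _ hx
        have hbr'get : ∀ x, br'.getD x 0 = ((tp.drop (k+1)).count x : Int) := by
          intro x
          by_cases hx : x = now
          · rw [hx, hbr', getD_erase_self, hcnt0]; rfl
          · rw [hbr', getD_erase_of_ne _ _ _ _ hx, hbr1get_ne x hx]
        have hsz : (ch'.size = br'.size) ↔
            (dcount (tp.take (k+1)) = dcount (tp.drop (k+1))) := by
          rw [size_eq_dcount ch' _ hch'nd hch'mem, size_eq_dcount br' _ hbr'nd hbr'mem]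
        refine ⟨ch', br', ?_, hch'nd, hch'mem, hch'get, hbr'nd, hbr'mem, hbr'get⟩
        simp only [Prod.mk.injEq, true_and]
        rw [goodCnt_succ]
        by_cases h : dcount (tp.take (k+1)) = dcount (tp.drop (k+1))
        · rw [if_pos (hsz.mpr h), if_pos h]; push_cast; ring
        · rw [if_neg (fun hc => h (hsz.mp hc)), if_neg h]; push_cast; ring
      · -- now still occurs in drop (k+1): keep br1
        rw [if_neg hz]
        have hcnt : (tp.drop (k+1)).count now ≠ 0 := by
          intro h0; apply hz; rw [hbr1get_now, h0]; rfl
        have hmem : now ∈ tp.drop (k+1) := by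
          rw [← List.count_pos_iff]; omega
        have hbr1mem' : ∀ x, x ∈ br1.keys ↔ x ∈ tp.drop (k+1) := by
          intro x
          rw [hbr1mem x, hdropk]
          constructor
          · rintro (h | h)
            · exact h ▸ hmem
            · rcases List.mem_cons.mp h with h | h
              · exact h ▸ hmem
              · exact h
          · intro hx; exact Or.inr (List.mem_cons_of_mem _ hx)
        have hbr1get' : ∀ x, br1.getD x 0 = ((tp.drop (k+1)).count x : Int) := by
          intro x
          by_cases hx : x = now
          · rw [hx]; exact hbr1get_now
          · exact hbr1get_ne x hx
        have hsz : (ch'.size = br1.size) ↔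
            (dcount (tp.take (k+1)) = dcount (tp.drop (k+1))) := by
          rw [size_eq_dcount ch' _ hch'nd hch'mem, size_eq_dcount br1 _ hbr1nd hbr1mem']
        refine ⟨ch', br1, ?_, hch'nd, hch'mem, hch'get, hbr1nd, hbr1mem', hbr1get'⟩
        simp only [Prod.mk.injEq, true_and]
        rw [goodCnt_succ]
        by_cases h : dcount (tp.take (k+1)) = dcount (tp.drop (k+1))
        · rw [if_pos (hsz.mpr h), if_pos h]; push_cast; ring
        · rw [if_neg (fun hc => h (hsz.mp hc)), if_neg h]; push_cast; ring

-- the suffix table: entry k is the distinct count of the suffix from k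
theorem altright_fold (xs : List Int) :
    xs.foldl (fun (st : PySem.Set Int × List Int) t =>
        let seen := PySem.Set.add st.1 t
        (seen, st.2 ++ [PySem.Set.len seen])) (PySem.Set.empty, []) =
      (PySem.Set.ofList xs,
       (List.range xs.length).map (fun j => (dcount (xs.take (j+1)) : Int))) := by
  induction xs using List.reverseRecOn with
  | nil => rfl
  | append_singleton xs t ih =>
      rw [List.foldl_append, ih]
      simp only [List.foldl_cons, List.foldl_nil]
      have hset : PySem.Set.add (PySem.Set.ofList xs) t = PySem.Set.ofList (xs ++ [t]) := by
        rw [PySem.Set.ofList_eq_foldl, PySem.Set.ofList_eq_foldl, List.foldl_append]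
        rfl
      simp only [Prod.mk.injEq]
      refine ⟨hset, ?_⟩
      rw [List.length_append, List.length_singleton, List.range_succ, List.map_append]
      congr 1
      · apply List.map_congr_left
        intro j hj
        have hj' : j + 1 ≤ xs.length := by
          have := List.mem_range.mp hj; omega
        rw [List.take_append_of_le_length hj']
      · have hfull : (xs ++ [t]).take (xs.length + 1) = xs ++ [t] := by
          apply List.take_of_length_le; simp
        rw [List.map_singleton, hfull, hset]
        rfl

theorem right_spec (tp : List Int) (k : ℕ) (hk : k < tp.length) :
    PySem.List.pyGetD (solutionAltRight tp) (k : Int) 0 = (dcount (tp.drop k) : Int) := by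
  unfold solutionAltRight
  rw [altright_fold]
  have hlen : (((List.range tp.reverse.length).map
      (fun j => (dcount (tp.reverse.take (j+1)) : Int))).reverse).length = tp.length := by
    simp
  rw [PySem.List.pyGetD_eq_getElem _ 0 (by positivity) (by rw [hlen]; exact_mod_cast hk)]
  simp only [Int.toNat_natCast]
  rw [List.getElem_reverse]
  simp only [List.getElem_map, List.getElem_range, List.length_map, List.length_range,
    List.length_reverse]
  have h1 : tp.length - 1 - k + 1 = tp.length - k := by omega
  rw [h1, List.take_reverse]
  have h2 : tp.length - (tp.length - k) = k := by omega
  rw [h2]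
  norm_cast
  exact dcount_eq_of_mem_iff (by intro x; simp)

-- invariant for B's forward pass
theorem B_loop (tp : List Int) (k : ℕ) (hk : k < tp.length) :
    (PySem.List.pyRange 0 (k : Int) 1).foldl (solutionAltStep tp (solutionAltRight tp))
      (PySem.Set.empty, 0) = (PySem.Set.ofList (tp.take k), (goodCnt tp k : Int)) := by
  induction k with
  | zero => simp [PySem.List.pyRange_one_eq_nil, goodCnt, PySem.Set.empty]
  | succ k ih =>
      have hk' : k < tp.length := by omega
      have hrange : PySem.List.pyRange 0 ((k+1 : ℕ) : Int) 1
          = PySem.List.pyRange 0 (k : Int) 1 ++ [(k : Int)] := by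
        push_cast
        exact PySem.List.pyRange_one_succ_right (by positivity)
      rw [hrange, List.foldl_append, ih hk']
      simp only [List.foldl_cons, List.foldl_nil]
      unfold solutionAltStep
      rw [pyGetD_nat tp k hk']
      have htake : tp.take (k+1) = tp.take k ++ [tp[k]] := take_succ_getElem tp k hk'
      have hset : PySem.Set.add (PySem.Set.ofList (tp.take k)) tp[k]
          = PySem.Set.ofList (tp.take (k+1)) := by
        rw [htake, PySem.Set.ofList_eq_foldl, PySem.Set.ofList_eq_foldl, List.foldl_append]
        rfl
      have hidx : ((k : Int) + 1) = (((k+1 : ℕ)) : Int) := by push_cast; ring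
      have hlook : PySem.List.pyGetD (solutionAltRight tp) ((k : Int) + 1) 0
          = (dcount (tp.drop (k+1)) : Int) := by
        rw [hidx]; exact right_spec tp (k+1) hk
      simp only [Prod.mk.injEq]
      refine ⟨hset, ?_⟩
      rw [hset, hlook, goodCnt_succ]
      have hlen : PySem.Set.len (PySem.Set.ofList (tp.take (k+1)))
          = (dcount (tp.take (k+1)) : Int) := rfl
      rw [hlen]
      by_cases h : dcount (tp.take (k+1)) = dcount (tp.drop (k+1))
      · rw [if_pos (by exact_mod_cast h), if_pos h]; push_cast; ring
      · rw [if_neg (by exact_mod_cast h), if_neg h]; push_cast; ring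

-- ===== VERDICT (by name: the statement is the Claim_ definition above) =====
theorem solution_spec : Claim_equal_solution := by
  unfold Claim_equal_solution
  intro tp _
  unfold Spec_solution solution solution_alt
  rcases Nat.eq_zero_or_pos tp.length with h0 | hpos
  · have htp : tp = [] := List.length_eq_zero_iff.mp h0
    subst htp; rfl
  · have hfirst :
        (PySem.List.pyRange 0 ((tp.length : Int)) 1).foldl
          (fun (b : PySem.Dict Int Int) i =>
            let top := PySem.List.pyGetD tp i 0
            b.insert top (b.getD top 0 + 1))
          PySem.Dict.empty = PySem.Dict.counter tp := by
      rw [PySem.List.foldl_pyRange_zero_pyGetD' tp 0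
        (fun (b : PySem.Dict Int Int) x => b.insert x (b.getD x 0 + 1)) PySem.Dict.empty]
      exact PySem.Dict.foldl_insert_getD_add_one_eq_counter tp
    simp only [hfirst]
    have hcast : ((tp.length : Int) - 1) = (((tp.length - 1 : ℕ)) : Int) := by
      have : (1 : ℕ) ≤ tp.length := hpos
      push_cast [this]; ring
    rw [hcast]
    obtain ⟨ch, br, heq, -, -, -, -, -, -⟩ := A_loop tp (tp.length - 1) (by omega)
    rw [heq, B_loop tp (tp.length - 1) (by omega)]
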